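-- pv_equiv track=rewrite | github.com/sudha702560/Python-DSA | DSA.py | DigitOperations
-- ===== SOURCE A (Python) =====
-- def DigitOperations(n):
--     """Return count, sum, and product of digits in a number."""
--     count = 0
--     sum_digits = 0
--     product = 1
--
--     while n != 0:
--         temp = n % 10
--         n = n // 10
--         count += 1
--         sum_digits += temp
--         product *= temp
--
--     return count, sum_digits, product
-- ===== SOURCE B (Python) =====
-- def DigitOperations(n):
--     """Return count, sum, and product of digits in a number (recursive decomposition)."""
--     if n == 0:
--         return 0, 0, 1
--     count, sum_digits, product = DigitOperations(n // 10)
--     d = n % 10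
--     return count + 1, sum_digits + d, product * d
-- ===== Notes on version B (the rewrite author's own statement) =====
-- stated objective: alternative
-- what changed: Replaced the iterative three-accumulator while-loop by a structural recursion that strips the last digit and combines count/sum/product on the way back out of the recursion.
import Mathlib
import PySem

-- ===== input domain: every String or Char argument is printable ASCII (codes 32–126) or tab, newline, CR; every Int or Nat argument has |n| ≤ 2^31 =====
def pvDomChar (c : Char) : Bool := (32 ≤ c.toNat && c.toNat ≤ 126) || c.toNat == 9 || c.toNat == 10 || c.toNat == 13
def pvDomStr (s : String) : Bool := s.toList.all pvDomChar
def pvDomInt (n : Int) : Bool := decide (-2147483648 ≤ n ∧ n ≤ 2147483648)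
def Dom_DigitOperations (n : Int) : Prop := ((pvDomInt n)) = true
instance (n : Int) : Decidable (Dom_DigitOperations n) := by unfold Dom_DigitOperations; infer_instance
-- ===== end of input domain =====

-- B replaces A's three-accumulator while-loop with a recursion that strips the last digit and combines
-- each digit on the way back out; equal cost (objective: alternative).
-- On negative n neither Python returns (A loops forever, B recurses forever); the fueled ports agree there too.

-- ===== PORT A =====
-- A's while-loop as a fuel-guarded tail recursion over the same state (count, sum_digits, product);
-- the fuel only makes the loop total in Lean: for n ≥ 0 it exceeds the iteration count.
def DigitOpsLoopA : Nat → Int → Int → Int → Int → Int × Int × Int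
  | 0, _, count, sum_digits, product => (count, sum_digits, product)
  | fuel + 1, n, count, sum_digits, product =>
    if n = 0 then (count, sum_digits, product)
    else
      let temp := PySem.Int.mod n 10
      DigitOpsLoopA fuel (PySem.Int.floordiv n 10) (count + 1) (sum_digits + temp) (product * temp)

def DigitOperations (n : Int) : Int × Int × Int :=
  DigitOpsLoopA (n.natAbs + 1) n 0 0 1

-- ===== PORT B =====
-- B's recursion, fuel-guarded for totality only (for n ≥ 0 the fuel exceeds the recursion depth).
def DigitOpsRecB : Nat → Int → Int × Int × Int
  | 0, _ => (0, 0, 1)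
  | fuel + 1, n =>
    if n = 0 then (0, 0, 1)
    else
      let r := DigitOpsRecB fuel (PySem.Int.floordiv n 10)
      let d := PySem.Int.mod n 10
      (r.1 + 1, r.2.1 + d, r.2.2 * d)

def DigitOperations_alt (n : Int) : Int × Int × Int :=
  DigitOpsRecB (n.natAbs + 1) n

-- ===== PRECONDITION & SPEC =====
def Spec_DigitOperations (n : Int) (out : Int × Int × Int) : Prop := out = DigitOperations_alt n
instance (n : Int) (out : Int × Int × Int) : Decidable (Spec_DigitOperations n out) := by unfold Spec_DigitOperations; infer_instance

-- ===== CLAIM (what is proved, stated in full; the proofs are below) =====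
def Claim_equal_DigitOperations : Prop := ∀ (n : Int), Dom_DigitOperations n → Spec_DigitOperations n (DigitOperations n)

-- ===== LEMMAS AND PROOFS =====

-- The accumulator loop computes the recursion's result combined with the accumulators.
theorem loopA_eq_recB (fuel : Nat) : ∀ (n count sum_digits product : Int),
    DigitOpsLoopA fuel n count sum_digits product =
      (count + (DigitOpsRecB fuel n).1,
       sum_digits + (DigitOpsRecB fuel n).2.1,
       product * (DigitOpsRecB fuel n).2.2) := by
  induction fuel with
  | zero =>
    intro n count sum_digits product
    simp [DigitOpsLoopA, DigitOpsRecB]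
  | succ fuel ih =>
    intro n count sum_digits product
    by_cases h : n = 0
    · simp [DigitOpsLoopA, DigitOpsRecB, h]
    · simp only [DigitOpsLoopA, DigitOpsRecB, h]
      rw [ih]
      refine Prod.ext ?_ (Prod.ext ?_ ?_) <;> simp <;> ring

-- ===== VERDICT (by name: the statement is the Claim_ definition above) =====
theorem DigitOperations_spec : Claim_equal_DigitOperations := by
  intro n _
  unfold Spec_DigitOperations DigitOperations DigitOperations_alt
  rw [loopA_eq_recB]
  refine Prod.ext ?_ (Prod.ext ?_ ?_) <;> simp
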